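-- pv_equiv track=rewrite | github.com/pyrodie18/AdventOfCode2020 | Day12/D12b.py | get_new_waypoint
-- ===== SOURCE A (Python) =====
-- def get_new_waypoint(waypoint_horizontal, waypoint_vertical, direction, degrees):
--     num_of_turns = degrees // 90
--     corrdinates = [waypoint_horizontal, waypoint_vertical]
--     if direction == "L":
--         for i in range(num_of_turns):
--             corrdinates = [corrdinates[1] * -1, corrdinates[0]]
--     else:
--         for i in range(num_of_turns):
--             corrdinates = [corrdinates[1], corrdinates[0] * -1]
--     return corrdinates
-- ===== SOURCE B (Python) =====
-- def get_new_waypoint(waypoint_horizontal, waypoint_vertical, direction, degrees):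
--     turns = degrees // 90
--     t = turns % 4 if turns > 0 else 0
--     h, v = waypoint_horizontal, waypoint_vertical
--     if direction == "L":
--         table = ([h, v], [-v, h], [-h, -v], [v, -h])
--     else:
--         table = ([h, v], [v, -h], [-h, -v], [-v, h])
--     return list(table[t])
-- ===== Notes on version B (the rewrite author's own statement) =====
-- stated objective: simpler
-- what changed: Replaces A's per-90-degree rotation loop by a constant-time table lookup: the effective rotation count degrees//90 mod 4 (clamped to 0 when non-positive, matching A's empty loop) selects one of four closed-form coordinate pairs.
import Mathlib
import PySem

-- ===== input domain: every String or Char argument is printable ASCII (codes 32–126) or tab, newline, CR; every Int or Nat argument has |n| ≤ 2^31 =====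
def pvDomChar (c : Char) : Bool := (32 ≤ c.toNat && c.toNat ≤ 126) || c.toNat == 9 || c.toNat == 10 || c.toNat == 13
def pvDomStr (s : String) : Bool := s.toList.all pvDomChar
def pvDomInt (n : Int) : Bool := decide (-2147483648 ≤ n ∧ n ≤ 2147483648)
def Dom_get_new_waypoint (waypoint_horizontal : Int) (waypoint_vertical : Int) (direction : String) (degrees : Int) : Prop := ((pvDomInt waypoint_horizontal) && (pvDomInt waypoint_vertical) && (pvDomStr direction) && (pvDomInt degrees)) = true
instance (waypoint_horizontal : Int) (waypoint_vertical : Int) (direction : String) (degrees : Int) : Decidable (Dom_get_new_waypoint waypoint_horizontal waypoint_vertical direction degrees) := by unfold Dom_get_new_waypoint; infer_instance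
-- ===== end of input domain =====

-- B replaces A's per-90° rotation loop by a constant-time 4-entry table lookup (simpler; O(1) vs O(degrees/90)).

-- ===== PORT A =====
-- one loop body: corrdinates = [corrdinates[1] * -1, corrdinates[0]]
-- (indexing is via pyGet?; on the 2-element state it is always `some`, `.getD 0` is never reached)
def pvStepL (c : List Int) : List Int :=
  [((PySem.List.pyGet? c 1).getD 0) * (-1), (PySem.List.pyGet? c 0).getD 0]

-- else-branch body: corrdinates = [corrdinates[1], corrdinates[0] * -1]
def pvStepR (c : List Int) : List Int :=
  [(PySem.List.pyGet? c 1).getD 0, ((PySem.List.pyGet? c 0).getD 0) * (-1)]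

-- `for i in range(n): c = f(c)` — n-fold application (range of a non-positive count is empty, hence .toNat)
def pvLoop (f : List Int → List Int) : Nat → List Int → List Int
  | 0, c => c
  | n + 1, c => pvLoop f n (f c)

def get_new_waypoint (waypoint_horizontal : Int) (waypoint_vertical : Int) (direction : String) (degrees : Int) : List Int :=
  let num_of_turns := PySem.Int.floordiv degrees 90
  let corrdinates : List Int := [waypoint_horizontal, waypoint_vertical]
  if direction == "L" then
    pvLoop pvStepL num_of_turns.toNat corrdinates
  else
    pvLoop pvStepR num_of_turns.toNat corrdinates

-- ===== PORT B =====
def get_new_waypoint_alt (waypoint_horizontal : Int) (waypoint_vertical : Int) (direction : String) (degrees : Int) : List Int :=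
  let turns := PySem.Int.floordiv degrees 90
  let t : Int := if turns > 0 then PySem.Int.mod turns 4 else 0
  let h := waypoint_horizontal
  let v := waypoint_vertical
  let table : List (List Int) :=
    if direction == "L" then [[h, v], [-v, h], [-h, -v], [v, -h]]
    else [[h, v], [v, -h], [-h, -v], [-v, h]]
  (PySem.List.pyGet? table t).getD []  -- t ∈ {0,1,2,3}, lookup always succeeds

-- ===== PRECONDITION & SPEC =====
def Spec_get_new_waypoint (waypoint_horizontal : Int) (waypoint_vertical : Int) (direction : String) (degrees : Int) (out : List Int) : Prop := out = get_new_waypoint_alt waypoint_horizontal waypoint_vertical direction degrees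
instance (waypoint_horizontal : Int) (waypoint_vertical : Int) (direction : String) (degrees : Int) (out : List Int) : Decidable (Spec_get_new_waypoint waypoint_horizontal waypoint_vertical direction degrees out) := by unfold Spec_get_new_waypoint; infer_instance

-- ===== CLAIM (what is proved, stated in full; the proofs are below) =====
def Claim_equal_get_new_waypoint : Prop := ∀ (waypoint_horizontal : Int) (waypoint_vertical : Int) (direction : String) (degrees : Int), Dom_get_new_waypoint waypoint_horizontal waypoint_vertical direction degrees → Spec_get_new_waypoint waypoint_horizontal waypoint_vertical direction degrees (get_new_waypoint waypoint_horizontal waypoint_vertical direction degrees)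

-- ===== LEMMAS AND PROOFS =====
theorem pvLoopL_eq (n : Nat) (h v : Int) :
    pvLoop pvStepL n [h, v] =
      if n % 4 = 0 then [h, v] else if n % 4 = 1 then [-v, h]
      else if n % 4 = 2 then [-h, -v] else [v, -h] := by
  induction n generalizing h v with
  | zero => simp [pvLoop]
  | succ n ih =>
      have hstep : pvStepL [h, v] = [-v, h] := by
        simp [pvStepL, PySem.List.pyGet?, PySem.List.pyIdx?]
      rw [pvLoop, hstep, ih]
      have h4 : n % 4 = 0 ∨ n % 4 = 1 ∨ n % 4 = 2 ∨ n % 4 = 3 := by omega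
      rcases h4 with h4 | h4 | h4 | h4 <;>
        · have h5 : (n + 1) % 4 = (n % 4 + 1) % 4 := by omega
          simp [h4, h5]

theorem pvLoopR_eq (n : Nat) (h v : Int) :
    pvLoop pvStepR n [h, v] =
      if n % 4 = 0 then [h, v] else if n % 4 = 1 then [v, -h]
      else if n % 4 = 2 then [-h, -v] else [-v, h] := by
  induction n generalizing h v with
  | zero => simp [pvLoop]
  | succ n ih =>
      have hstep : pvStepR [h, v] = [v, -h] := by
        simp [pvStepR, PySem.List.pyGet?, PySem.List.pyIdx?]
      rw [pvLoop, hstep, ih]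
      have h4 : n % 4 = 0 ∨ n % 4 = 1 ∨ n % 4 = 2 ∨ n % 4 = 3 := by omega
      rcases h4 with h4 | h4 | h4 | h4 <;>
        · have h5 : (n + 1) % 4 = (n % 4 + 1) % 4 := by omega
          simp [h4, h5]

-- ===== VERDICT (by name: the statement is the Claim_ definition above) =====
theorem get_new_waypoint_spec : Claim_equal_get_new_waypoint := by
  intro h v dir deg _
  unfold Spec_get_new_waypoint get_new_waypoint get_new_waypoint_alt
  set n := PySem.Int.floordiv deg 90 with hn
  have hmod : PySem.Int.mod n 4 = n % 4 := PySem.Int.mod_eq_emod_of_pos (by omega)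
  by_cases hpos : n > 0
  · have ht : (if n > 0 then PySem.Int.mod n 4 else 0) = n % 4 := by rw [if_pos hpos, hmod]
    have hnat : n.toNat % 4 = (n % 4).toNat := by omega
    have h4 : n % 4 = 0 ∨ n % 4 = 1 ∨ n % 4 = 2 ∨ n % 4 = 3 := by omega
    rcases h4 with h4 | h4 | h4 | h4 <;>
      · have h4n : n.toNat % 4 = (n % 4).toNat := hnat
        rw [h4] at h4n
        simp only [ht, h4]
        by_cases hd : dir == "L" <;>
          simp [hd, pvLoopL_eq, pvLoopR_eq, h4n, PySem.List.pyGet?, PySem.List.pyIdx?]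
  · have hz : n.toNat = 0 := by omega
    simp only [if_neg hpos, hz]
    by_cases hd : dir == "L" <;>
      simp [hd, pvLoop, PySem.List.pyGet?, PySem.List.pyIdx?]
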